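-- pv_equiv track=rewrite | github.com/adriengrelet/neon | player_manage.py | format_inventory_counts
-- ===== SOURCE A (Python) =====
-- def count_inventory_items(items):
--     counts = {}
--     for item in items:
--         counts[item] = counts.get(item, 0) + 1
--     return counts
--
-- def format_inventory_counts(items):
--     counts = count_inventory_items(items)
--     if not counts:
--         return "[]"
--     chunks = []
--     for key in sorted(counts.keys()):
--         chunks.append(f"{key} x{counts[key]}")
--     return ", ".join(chunks)
-- ===== SOURCE B (Python) =====
-- def format_inventory_counts(items):
--     if not items:
--         return "[]"
--     srt = sorted(items)
--     parts = []
--     cur = srt[0]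
--     cnt = 0
--     for x in srt:
--         if x == cur:
--             cnt += 1
--         else:
--             parts.append(f"{cur} x{cnt}")
--             cur = x
--             cnt = 1
--     parts.append(f"{cur} x{cnt}")
--     return ", ".join(parts)
-- ===== Notes on version B (the rewrite author's own statement) =====
-- stated objective: alternative
-- what changed: Replaces the frequency-dict-then-sort-keys strategy by sort-then-group: sort the items once and emit one chunk per run of consecutive equal elements, so no counting dictionary is built.
import Mathlib
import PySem

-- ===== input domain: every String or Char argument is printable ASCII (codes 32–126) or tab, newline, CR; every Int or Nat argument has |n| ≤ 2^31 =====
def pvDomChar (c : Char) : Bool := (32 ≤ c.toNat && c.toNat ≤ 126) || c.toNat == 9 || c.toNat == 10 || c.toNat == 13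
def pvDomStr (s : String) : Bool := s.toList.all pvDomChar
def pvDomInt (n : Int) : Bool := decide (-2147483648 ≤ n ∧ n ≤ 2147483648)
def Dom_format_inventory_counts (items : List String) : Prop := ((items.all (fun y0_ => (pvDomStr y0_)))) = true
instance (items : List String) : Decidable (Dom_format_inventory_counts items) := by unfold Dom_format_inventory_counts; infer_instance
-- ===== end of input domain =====

-- B replaces A's frequency-dict-then-sort-keys strategy by sort-then-group over consecutive runs (alternative decomposition, same cost).

-- ===== PORT A =====
def format_inventory_counts (items : List String) : String :=
  let counts := items.foldl (fun d item => d.insert item (d.getD item 0 + 1))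
    (PySem.Dict.empty : PySem.Dict String Int)
  if counts.items = [] then "[]"
  else
    let chunks := (PySem.List.sorted counts.keys (fun k => k) false).foldl
      (fun acc key => acc ++ [key ++ " x" ++ PySem.Int.toStr ((counts.get? key).getD 0)]) []
    PySem.Str.join ", " chunks

-- ===== PORT B =====
def format_inventory_counts_alt (items : List String) : String :=
  if items = [] then "[]"
  else
    let srt := PySem.List.sorted items (fun x => x) false
    let st := srt.foldl
      (fun (st : List String × String × Int) x =>
        if x = st.2.1 then (st.1, st.2.1, st.2.2 + 1)
        else (st.1 ++ [st.2.1 ++ " x" ++ PySem.Int.toStr st.2.2], x, 1))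
      ([], PySem.List.pyGetD srt 0 "", 0)
    PySem.Str.join ", " (st.1 ++ [st.2.1 ++ " x" ++ PySem.Int.toStr st.2.2])

-- ===== PRECONDITION & SPEC =====
def Spec_format_inventory_counts (items : List String) (out : String) : Prop := out = format_inventory_counts_alt items
instance (items : List String) (out : String) : Decidable (Spec_format_inventory_counts items out) := by unfold Spec_format_inventory_counts; infer_instance

-- ===== CLAIM (what is proved, stated in full; the proofs are below) =====
def Claim_equal_format_inventory_counts : Prop := ∀ (items : List String), Dom_format_inventory_counts items → Spec_format_inventory_counts items (format_inventory_counts items)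

-- ===== LEMMAS AND PROOFS =====

-- chunk text for one key/count pair
def ficF (k : String) (c : Int) : String := k ++ " x" ++ PySem.Int.toStr c

-- B's loop step
def ficG (st : List String × String × Int) (x : String) : List String × String × Int :=
  if x = st.2.1 then (st.1, st.2.1, st.2.2 + 1)
  else (st.1 ++ [st.2.1 ++ " x" ++ PySem.Int.toStr st.2.2], x, 1)

-- first occurrences of each distinct element, in order
def ficKeys : List String → List String
  | [] => []
  | x :: t => x :: (ficKeys t).filter (fun y => decide (y ≠ x))

theorem ficKeys_mem (l : List String) (y : String) : y ∈ ficKeys l ↔ y ∈ l := by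
  induction l with
  | nil => simp [ficKeys]
  | cons x t ih =>
    simp only [ficKeys, List.mem_cons, List.mem_filter, ih, decide_eq_true_eq]
    by_cases hy : y = x <;> simp [hy]

theorem ficKeys_nodup (l : List String) : (ficKeys l).Nodup := by
  induction l with
  | nil => simp [ficKeys]
  | cons x t ih =>
    simp only [ficKeys, List.nodup_cons]
    refine ⟨?_, ih.filter _⟩
    intro hx
    rcases List.mem_filter.mp hx with ⟨_, h⟩
    simp at h

theorem ficKeys_pairwise (l : List String) (h : l.Pairwise (· ≤ ·)) :
    (ficKeys l).Pairwise (· < ·) := by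
  induction l with
  | nil => simp [ficKeys]
  | cons x t ih =>
    rcases List.pairwise_cons.mp h with ⟨hx, ht⟩
    refine List.pairwise_cons.mpr ⟨?_, (ih ht).filter _⟩
    intro y hy
    rcases List.mem_filter.mp hy with ⟨hmem, hne⟩
    have : y ∈ t := (ficKeys_mem t y).mp hmem
    have hle : x ≤ y := hx y this
    have : y ≠ x := by simpa using hne
    exact lt_of_le_of_ne hle (Ne.symm this)

theorem fic_parts (l : List String) : ∀ (parts : List String) (c : String) (n : Int),
    l.foldl ficG (parts, c, n) =
      (parts ++ (l.foldl ficG ([], c, n)).1, (l.foldl ficG ([], c, n)).2) := by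
  induction l with
  | nil => intro parts c n; simp
  | cons x t ih =>
    intro parts c n
    simp only [List.foldl_cons, ficG]
    by_cases hx : x = c
    · simp only [hx]
      exact ih parts c (n + 1)
    · simp only [if_neg hx]
      rw [ih (parts ++ [c ++ " x" ++ PySem.Int.toStr n]) x 1,
          ih ([] ++ [c ++ " x" ++ PySem.Int.toStr n]) x 1]
      simp

theorem fic_main (l : List String) (h : l.Pairwise (· ≤ ·)) :
    ∀ (c : String) (n : Int), (∀ y ∈ l, c ≤ y) →
    (l.foldl ficG ([], c, n)).1 ++
      [ficF (l.foldl ficG ([], c, n)).2.1 (l.foldl ficG ([], c, n)).2.2]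
    = ficF c (n + (l.count c : Int)) ::
        ((ficKeys l).filter (fun y => decide (y ≠ c))).map (fun k => ficF k ((l.count k : Int))) := by
  induction l with
  | nil => intro c n _; simp [ficKeys, ficF]
  | cons x t ih =>
    intro c n hc
    rcases List.pairwise_cons.mp h with ⟨hx, ht⟩
    by_cases hxc : x = c
    · subst hxc
      simp only [List.foldl_cons, ficG, if_true]
      rw [ih ht x (n + 1) hx]
      have hcount : ((x :: t).count x : Int) = (t.count x : Int) + 1 := by
        simp
      have hfilter : ((ficKeys (x :: t)).filter (fun y => decide (y ≠ x)))
          = (ficKeys t).filter (fun y => decide (y ≠ x)) := by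
        simp only [ficKeys, List.filter_cons]
        rw [if_neg (by simp)]
        rw [List.filter_filter]
        apply List.filter_congr
        intro a _; by_cases ha : a = x <;> simp [ha]
      rw [hfilter]
      congr 1
      · congr 1; omega
      · apply List.map_congr_left
        intro k hk
        rcases List.mem_filter.mp hk with ⟨_, hne⟩
        have : k ≠ x := by simpa using hne
        simp [Ne.symm this]
    · have hcx : c < x := lt_of_le_of_ne (hc x (List.mem_cons_self)) (Ne.symm hxc)
      simp only [List.foldl_cons, ficG, if_neg hxc, List.nil_append]
      rw [fic_parts t [c ++ " x" ++ PySem.Int.toStr n] x 1]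
      have hxall : ∀ y ∈ t, x ≤ y := hx
      rw [List.append_assoc, List.singleton_append]
      rw [ih ht x 1 hxall]
      have hcnot : c ∉ x :: t := by
        intro hmem
        rcases List.mem_cons.mp hmem with h1 | h2
        · exact hxc h1.symm
        · exact absurd (lt_of_lt_of_le hcx (hxall c h2)) (lt_irrefl c)
      have hcount0 : (x :: t).count c = 0 := List.count_eq_zero.mpr hcnot
      have hfilter : ((ficKeys (x :: t)).filter (fun y => decide (y ≠ c))) = ficKeys (x :: t) := by
        apply List.filter_eq_self.mpr
        intro a ha
        have : a ∈ x :: t := (ficKeys_mem _ _).mp ha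
        have : a ≠ c := fun hac => hcnot (hac ▸ this)
        simpa using this
      rw [hcount0, hfilter]
      simp only [ficKeys, List.map_cons]
      congr 1
      · simp [ficF]
      · congr 1
        · simp [ficF]
          congr 1
          omega
        · apply List.map_congr_left
          intro k hk
          rcases List.mem_filter.mp hk with ⟨_, hne⟩
          have : k ≠ x := by simpa using hne
          simp [Ne.symm this]

theorem foldl_app_map (h : String → String) (l : List String) :
    ∀ acc : List String, l.foldl (fun acc k => acc ++ [h k]) acc = acc ++ l.map h := by
  induction l with
  | nil => intro acc; simp
  | cons x t ih => intro acc; simp [ih]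

theorem fic_A_unfold (items : List String) :
    format_inventory_counts items =
      if ((items.foldl (fun d item => d.insert item (d.getD item 0 + 1)) (PySem.Dict.empty : PySem.Dict String Int)).items = []) then "[]"
      else PySem.Str.join ", "
        ((PySem.List.sorted (items.foldl (fun d item => d.insert item (d.getD item 0 + 1)) (PySem.Dict.empty : PySem.Dict String Int)).keys (fun k => k) false).foldl
          (fun acc key => acc ++ [key ++ " x" ++ PySem.Int.toStr (((items.foldl (fun d item => d.insert item (d.getD item 0 + 1)) (PySem.Dict.empty : PySem.Dict String Int)).get? key).getD 0)]) []) := rfl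

theorem fic_B_unfold (items : List String) :
    format_inventory_counts_alt items =
      if items = [] then "[]"
      else PySem.Str.join ", "
        (((PySem.List.sorted items (fun x => x) false).foldl ficG ([], PySem.List.pyGetD (PySem.List.sorted items (fun x => x) false) (0 : Int) "", (0 : Int))).1 ++
          [((PySem.List.sorted items (fun x => x) false).foldl ficG ([], PySem.List.pyGetD (PySem.List.sorted items (fun x => x) false) (0 : Int) "", (0 : Int))).2.1 ++ " x" ++
            PySem.Int.toStr ((PySem.List.sorted items (fun x => x) false).foldl ficG ([], PySem.List.pyGetD (PySem.List.sorted items (fun x => x) false) (0 : Int) "", (0 : Int))).2.2]) := rfl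

-- ===== VERDICT (by name: the statement is the Claim_ definition above) =====
theorem format_inventory_counts_spec : Claim_equal_format_inventory_counts := by
  intro items _
  unfold Spec_format_inventory_counts
  rw [fic_A_unfold, fic_B_unfold, PySem.Dict.foldl_insert_getD_add_one_eq_counter]
  by_cases hnil : items = []
  · subst hnil; decide
  · have hcne : (PySem.Dict.counter items).items ≠ [] := by
      rw [PySem.Dict.items_counter]
      intro hmap
      rcases List.exists_mem_of_ne_nil items hnil with ⟨a, ha⟩
      have : a ∈ PySem.Set.ofList items := (PySem.Set.mem_ofList items a).mpr ha
      rw [List.map_eq_nil_iff.mp hmap] at this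
      simp at this
    rw [if_neg hcne, if_neg hnil]
    obtain ⟨m, t, hsrt⟩ : ∃ m t, PySem.List.sorted items (fun x => x) false = m :: t := by
      cases hs : PySem.List.sorted items (fun x => x) false with
      | nil =>
        exfalso
        have := PySem.List.sorted_perm items (fun x => x) false
        rw [hs] at this
        exact hnil (this.symm.eq_nil)
      | cons m t => exact ⟨m, t, rfl⟩
    have hperm : (m :: t).Perm items := by
      rw [← hsrt]; exact PySem.List.sorted_perm items (fun x => x) false
    have hpw : (m :: t).Pairwise (· ≤ ·) := by
      rw [← hsrt]; exact PySem.List.sorted_pairwise items (fun x => x)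
    rw [hsrt]
    have hget0 : PySem.List.pyGetD (m :: t) (0 : Int) "" = m := by
      simp [PySem.List.pyGetD_zero_cons]
    rw [hget0]
    have hm : ∀ y ∈ m :: t, m ≤ y := by
      intro y hy
      rcases List.mem_cons.mp hy with h1 | h2
      · exact le_of_eq h1.symm
      · exact (List.pairwise_cons.mp hpw).1 y h2
    have hB := fic_main (m :: t) hpw m 0 hm
    simp only [ficF] at hB
    rw [hB]
    -- A side
    rw [foldl_app_map (fun key => key ++ " x" ++ PySem.Int.toStr (((PySem.Dict.counter items).get? key).getD 0))]
    rw [PySem.Dict.keys_counter]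
    have hsorted_keys : PySem.List.sorted (PySem.Set.ofList items) (fun k => k) false
        = ficKeys (m :: t) := by
      apply PySem.List.sorted_eq_of_perm_of_pairwise_lt
      · apply (List.perm_ext_iff_of_nodup (ficKeys_nodup _) (PySem.Set.nodup_ofList _)).mpr
        intro a
        rw [ficKeys_mem, PySem.Set.mem_ofList]
        exact ⟨fun h => hperm.mem_iff.mp ((ficKeys_mem _ _).mpr h |> (ficKeys_mem _ _).mp), fun h => hperm.mem_iff.mpr h⟩
      · exact ficKeys_pairwise _ hpw
    rw [hsorted_keys]
    have hmap : (ficKeys (m :: t)).map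
        (fun key => key ++ " x" ++ PySem.Int.toStr (((PySem.Dict.counter items).get? key).getD 0))
        = (ficKeys (m :: t)).map (fun k => k ++ " x" ++ PySem.Int.toStr (((m :: t).count k : Int))) := by
      apply List.map_congr_left
      intro k _
      rw [← PySem.Dict.getD_eq_get?_getD, PySem.Dict.getD_counter, hperm.count_eq]
    rw [hmap]
    have hkeys : ficKeys (m :: t) = m :: (ficKeys t).filter (fun y => decide (y ≠ m)) := rfl
    have hfilter : (ficKeys (m :: t)).filter (fun y => decide (y ≠ m))
        = (ficKeys t).filter (fun y => decide (y ≠ m)) := by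
      rw [hkeys, List.filter_cons]
      rw [if_neg (by simp)]
      rw [List.filter_filter]
      apply List.filter_congr
      intro a _; by_cases ha : a = m <;> simp [ha]
    rw [hfilter, hkeys, List.map_cons]
    simp
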